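-- pv_equiv track=rewrite | github.com/golemfactory/ansible-role-wireguard | gen_wireguard/gen_wireguard.py | all_or_none
-- ===== SOURCE A (Python) =====
-- from collections.abc import Iterable
-- from typing import (
--     Any,
--     Dict,
--     List,
--     Optional,
--     Set,
--     Tuple,
--     TypeVar,
-- )
--
-- def all_or_none(iterable: Iterable[Any]) -> bool:
--     # return True if either all elements are True or all are False
--     all_ = True
--     none = True
--     for item in iterable:
--         if bool(item):
--             none = False
--         else:
--             all_ = False
--     return all_ or none
-- ===== SOURCE B (Python) =====
-- def all_or_none(iterable) -> bool:
--     return len({bool(x) for x in iterable}) <= 1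
-- ===== Notes on version B (the rewrite author's own statement) =====
-- stated objective: idiomatic
-- what changed: Replaces the two running flags accumulated in an explicit loop by a set comprehension collecting the distinct truthiness values and a cardinality test (<= 1 distinct value means all-same).
import Mathlib
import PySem

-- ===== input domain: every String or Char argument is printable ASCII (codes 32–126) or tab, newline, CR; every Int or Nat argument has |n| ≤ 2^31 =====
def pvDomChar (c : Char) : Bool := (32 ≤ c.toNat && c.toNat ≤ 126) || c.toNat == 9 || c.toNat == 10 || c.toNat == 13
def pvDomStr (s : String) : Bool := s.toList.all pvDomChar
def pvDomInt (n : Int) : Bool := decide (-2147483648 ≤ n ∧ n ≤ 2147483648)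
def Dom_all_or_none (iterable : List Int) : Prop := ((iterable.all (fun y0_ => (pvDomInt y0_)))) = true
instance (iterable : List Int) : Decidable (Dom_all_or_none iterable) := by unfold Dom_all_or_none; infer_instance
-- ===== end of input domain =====

-- B replaces A's two running flags by the set of distinct truthiness values and a cardinality test (idiomatic; same cost).

-- ===== PORT A =====
-- loop over the items keeping the pair (all_, none), then 'all_ or none'
def all_or_none (iterable : List Int) : Bool :=
  let st := iterable.foldl
    (fun (st : Bool × Bool) item => if item ≠ 0 then (st.1, false) else (false, st.2))
    (true, true)
  st.1 || st.2

-- ===== PORT B =====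
-- s = {bool(x) for x in iterable}; return len(s) <= 1
def all_or_none_alt (iterable : List Int) : Bool :=
  let s : PySem.Set Bool := PySem.Set.ofList (iterable.map (fun x => decide (x ≠ 0)))
  decide (PySem.Set.len s ≤ 1)

-- ===== PRECONDITION & SPEC =====
def Spec_all_or_none (iterable : List Int) (out : Bool) : Prop := out = all_or_none_alt iterable
instance (iterable : List Int) (out : Bool) : Decidable (Spec_all_or_none iterable out) := by unfold Spec_all_or_none; infer_instance

-- ===== CLAIM (what is proved, stated in full; the proofs are below) =====
def Claim_equal_all_or_none : Prop := ∀ (iterable : List Int), Dom_all_or_none iterable → Spec_all_or_none iterable (all_or_none iterable)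

-- ===== LEMMAS AND PROOFS =====

-- A's fold computes the two 'all nonzero' / 'all zero' flags
theorem pv_foldA (l : List Int) (a n : Bool) :
    l.foldl (fun (st : Bool × Bool) item => if item ≠ 0 then (st.1, false) else (false, st.2)) (a, n)
      = (a && l.all (fun x => !decide (x = 0)), n && l.all (fun x => decide (x = 0))) := by
  induction l generalizing a n with
  | nil => simp
  | cons x xs ih =>
    by_cases hx : x = 0
    · simp only [List.foldl_cons, ih, List.all_cons, hx]
      simp
    · simp only [List.foldl_cons, if_pos hx, ih, List.all_cons]
      simp [hx]

-- a duplicate-free list of booleans has ≤ 1 element iff it does not contain both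
theorem pv_bool_nodup_len (s : List Bool) (h : s.Nodup) :
    s.length ≤ 1 ↔ ¬ (true ∈ s ∧ false ∈ s) := by
  match s with
  | [] => simp
  | [b] => cases b <;> simp
  | b :: c :: t =>
    simp only [List.nodup_cons, List.mem_cons] at h
    constructor
    · intro hlen; simp at hlen
    · intro hmem
      exfalso; apply hmem
      cases b <;> cases c <;> simp_all

theorem all_or_none_eq_or (l : List Int) :
    all_or_none l = ((l.all fun x => !decide (x = 0)) || l.all fun x => decide (x = 0)) := by
  unfold all_or_none
  rw [pv_foldA]
  simp

-- ===== VERDICT (by name: the statement is the Claim_ definition above) =====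
theorem all_or_none_spec : Claim_equal_all_or_none := by
  intro l _
  show all_or_none l = all_or_none_alt l
  rw [all_or_none_eq_or]
  unfold all_or_none_alt
  set s : List Bool := PySem.Set.ofList (l.map (fun x => decide (x ≠ 0))) with hs
  have hcast : (decide (PySem.Set.len s ≤ 1)) = decide (s.length ≤ 1) := by
    apply decide_eq_decide.mpr
    unfold PySem.Set.len
    omega
  rw [hcast]
  have hnd : s.Nodup := by rw [hs]; exact PySem.Set.nodup_ofList (xs := l.map (fun x => decide (x ≠ 0)))
  have hlen := pv_bool_nodup_len s hnd
  have hmem : ∀ b : Bool, b ∈ s ↔ ∃ x ∈ l, decide (x ≠ 0) = b := by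
    intro b; rw [hs, PySem.Set.mem_ofList]; simp [eq_comm]
  by_cases hc : s.length ≤ 1
  · rw [decide_eq_true hc]
    rw [hlen] at hc
    rcases Classical.em (∃ x ∈ l, x ≠ 0) with ⟨x, hxl, hx0⟩ | hnex
    · have hf : false ∉ s := fun hmf =>
        hc ⟨(hmem true).mpr ⟨x, hxl, by simp [hx0]⟩, hmf⟩
      have : (l.all fun y => !decide (y = 0)) = true := by
        simp only [List.all_eq_true]
        intro y hy
        by_contra hny
        exact hf ((hmem false).mpr ⟨y, hy, by
          simp only [Bool.not_eq_true', decide_eq_false_iff_not, Decidable.not_not] at hny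
          simp [hny]⟩)
      simp [this]
    · push Not at hnex
      have : (l.all fun x => decide (x = 0)) = true := by
        simp only [List.all_eq_true, decide_eq_true_eq]
        exact hnex
      rw [this, Bool.or_true]
  · rw [decide_eq_false hc]
    rw [hlen, not_not] at hc
    obtain ⟨ht, hf⟩ := hc
    obtain ⟨x, hxl, hx⟩ := (hmem true).mp ht
    obtain ⟨y, hyl, hy⟩ := (hmem false).mp hf
    simp only [decide_eq_true_eq] at hx
    have hy0 : y = 0 := by by_contra h; simp [h] at hy
    rw [Bool.or_eq_false_iff]
    refine ⟨List.all_eq_false.mpr ⟨y, hyl, ?_⟩, List.all_eq_false.mpr ⟨x, hxl, ?_⟩⟩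
    · simp [hy0]
    · simp [hx]
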